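-- pv_equiv track=rewrite | github.com/sciknoworg/OntoLearner | ontolearner/text2onto/synthesizer.py | _build_relational_context
-- ===== SOURCE A (Python) =====
-- from typing import Any, Dict, List, Optional
--
-- def _build_relational_context(batch_row: Dict[str, Any], child_to_parent: Dict[str, List[str]],
--                               relation_context: Dict[str, List[str]]) -> List[str]:
--     context_lines: List[str] = []
--     seen = set()
--
--     def add_line(line: str) -> None:
--         if line not in seen:  # and len(context_lines) < self.max_context_items:
--             context_lines.append(line)
--             seen.add(line)
--
--     for term in batch_row.get("terms", []) or []:
--         parents = child_to_parent.get(term, []) or []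
--         if parents:
--             add_line(f"- term {term}: types/parents -> {', '.join(parents)}")
--         for rel in relation_context.get(term, []) or []:
--             add_line(f"- term {term}: related fact -> {rel}")
--
--     for ont_type in batch_row.get("types", []) or []:
--         parents = child_to_parent.get(ont_type, []) or []
--         if parents:
--             add_line(f"- type {ont_type}: parents -> {', '.join(parents)}")
--
--     return context_lines
-- ===== SOURCE B (Python) =====
-- from typing import Any, Dict, List, Optional
--
-- def _build_relational_context(batch_row: Dict[str, Any], child_to_parent: Dict[str, List[str]],
--                               relation_context: Dict[str, List[str]]) -> List[str]:
--     # Phase 1: generate the full candidate-line list (duplicates allowed) by comprehensions.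
--     def block(term):
--         parents = child_to_parent.get(term, []) or []
--         head = [f"- term {term}: types/parents -> {', '.join(parents)}"] if parents else []
--         return head + [f"- term {term}: related fact -> {rel}"
--                        for rel in relation_context.get(term, []) or []]
--     candidates = [line for term in (batch_row.get("terms", []) or []) for line in block(term)]
--     candidates += [f"- type {t}: parents -> {', '.join(ps)}"
--                    for t in (batch_row.get("types", []) or [])
--                    if (ps := child_to_parent.get(t, []) or [])]
--     # Phase 2: dedup by repeated select-first-and-filter (keeps first occurrences, in order).
--     out: List[str] = []
--     while candidates:
--         head = candidates[0]
--         out.append(head)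
--         candidates = [x for x in candidates[1:] if x != head]
--     return out
-- ===== Notes on version B (the rewrite author's own statement) =====
-- stated objective: alternative
-- what changed: A builds the result in one interleaved pass, deduplicating on the fly with a mutable seen-set inside add_line; B first generates the whole candidate-line list with comprehensions (duplicates allowed) and then deduplicates it by a select-first-and-filter loop (take the head, filter all its copies out of the rest), using no set or dict at all.
import Mathlib
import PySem

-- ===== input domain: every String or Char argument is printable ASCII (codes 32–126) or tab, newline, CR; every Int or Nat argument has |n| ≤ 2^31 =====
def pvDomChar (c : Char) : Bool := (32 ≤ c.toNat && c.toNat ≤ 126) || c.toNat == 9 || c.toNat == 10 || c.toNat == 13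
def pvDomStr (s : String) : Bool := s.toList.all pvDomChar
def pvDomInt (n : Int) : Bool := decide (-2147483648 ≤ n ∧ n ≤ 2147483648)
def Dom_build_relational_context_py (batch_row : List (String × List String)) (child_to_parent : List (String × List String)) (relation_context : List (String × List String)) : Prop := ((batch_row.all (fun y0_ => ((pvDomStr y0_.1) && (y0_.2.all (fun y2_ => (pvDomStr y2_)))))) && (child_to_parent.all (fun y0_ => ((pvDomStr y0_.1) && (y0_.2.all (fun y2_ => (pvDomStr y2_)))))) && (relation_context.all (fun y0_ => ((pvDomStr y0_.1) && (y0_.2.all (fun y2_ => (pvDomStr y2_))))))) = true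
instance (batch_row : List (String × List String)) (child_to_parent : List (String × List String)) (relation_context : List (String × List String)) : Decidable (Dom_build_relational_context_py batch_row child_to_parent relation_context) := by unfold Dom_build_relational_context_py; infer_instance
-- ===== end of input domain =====

-- B replaces A's single seen-set pass by two phases: comprehension-built candidate list,
-- then a select-first-and-filter dedup loop (no set/dict at all) — an alternative decomposition.

-- shared f-string formatting helpers (the literal line formats of both Pythons)
def lineTermParents (term : String) (parents : List String) : String :=
  PySem.Str.join "" ["- term ", term, ": types/parents -> ", PySem.Str.join ", " parents]
def lineTermRel (term rel : String) : String :=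
  PySem.Str.join "" ["- term ", term, ": related fact -> ", rel]
def lineTypeParents (t : String) (parents : List String) : String :=
  PySem.Str.join "" ["- type ", t, ": parents -> ", PySem.Str.join ", " parents]

-- ===== PORT A =====
-- state = (context_lines, seen); add_line as in the Python
def pyAddLine (st : List String × PySem.Set String) (line : String) : List String × PySem.Set String :=
  if PySem.Set.contains st.2 line then st else (st.1 ++ [line], PySem.Set.add st.2 line)

def build_relational_context_py (batch_row : List (String × List String)) (child_to_parent : List (String × List String)) (relation_context : List (String × List String)) : List String :=
  let st1 := ((PySem.Dict.mk batch_row).getD "terms" []).foldl (fun st term =>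
      let parents := (PySem.Dict.mk child_to_parent).getD term []
      let st' := if parents ≠ [] then pyAddLine st (lineTermParents term parents) else st
      ((PySem.Dict.mk relation_context).getD term []).foldl
        (fun st2 rel => pyAddLine st2 (lineTermRel term rel)) st')
    ([], PySem.Set.empty)
  let st2 := ((PySem.Dict.mk batch_row).getD "types" []).foldl (fun st ont_type =>
      let parents := (PySem.Dict.mk child_to_parent).getD ont_type []
      if parents ≠ [] then pyAddLine st (lineTypeParents ont_type parents) else st) st1
  st2.1

-- ===== PORT B =====
-- phase 1: the comprehension-built candidate list, duplicates and all
def bCandidates (batch_row : List (String × List String)) (child_to_parent : List (String × List String)) (relation_context : List (String × List String)) : List String :=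
  (((PySem.Dict.mk batch_row).getD "terms" []).flatMap (fun term =>
      let parents := (PySem.Dict.mk child_to_parent).getD term []
      (if parents ≠ [] then [lineTermParents term parents] else []) ++
      ((PySem.Dict.mk relation_context).getD term []).map (fun rel => lineTermRel term rel)))
  ++ (((PySem.Dict.mk batch_row).getD "types" []).filterMap (fun ont_type =>
      let parents := (PySem.Dict.mk child_to_parent).getD ont_type []
      if parents ≠ [] then some (lineTypeParents ont_type parents) else none))

-- phase 2: the select-first-and-filter dedup loop of Source B
def dedupFilter : List String → List String
  | [] => []
  | h :: t => h :: dedupFilter (t.filter (fun x => x != h))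
termination_by xs => xs.length
decreasing_by
  simpa using Nat.lt_succ_of_le (List.length_filter_le _ _)

def build_relational_context_py_alt (batch_row : List (String × List String)) (child_to_parent : List (String × List String)) (relation_context : List (String × List String)) : List String :=
  dedupFilter (bCandidates batch_row child_to_parent relation_context)

-- ===== PRECONDITION & SPEC =====
def Spec_build_relational_context_py (batch_row : List (String × List String)) (child_to_parent : List (String × List String)) (relation_context : List (String × List String)) (out : List String) : Prop := out = build_relational_context_py_alt batch_row child_to_parent relation_context
instance (batch_row : List (String × List String)) (child_to_parent : List (String × List String)) (relation_context : List (String × List String)) (out : List String) : Decidable (Spec_build_relational_context_py batch_row child_to_parent relation_context out) := by unfold Spec_build_relational_context_py; infer_instance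

-- ===== CLAIM =====
def Claim_equal_build_relational_context_py : Prop := ∀ (batch_row : List (String × List String)) (child_to_parent : List (String × List String)) (relation_context : List (String × List String)), Dom_build_relational_context_py batch_row child_to_parent relation_context → Spec_build_relational_context_py batch_row child_to_parent relation_context (build_relational_context_py batch_row child_to_parent relation_context)

-- ===== LEMMAS AND PROOFS =====

-- the per-term body of A's first loop is a fold of add_line over that term's candidate block
theorem stepTerm_eq (child_to_parent relation_context : List (String × List String)) (term : String) (st : List String × PySem.Set String) :
    (let parents := (PySem.Dict.mk child_to_parent).getD term []
     let st' := if parents ≠ [] then pyAddLine st (lineTermParents term parents) else st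
     ((PySem.Dict.mk relation_context).getD term []).foldl
       (fun st2 rel => pyAddLine st2 (lineTermRel term rel)) st')
    = ((if (PySem.Dict.mk child_to_parent).getD term [] ≠ [] then
          [lineTermParents term ((PySem.Dict.mk child_to_parent).getD term [])] else []) ++
       ((PySem.Dict.mk relation_context).getD term []).map (fun rel => lineTermRel term rel)).foldl
        pyAddLine st := by
  simp only [List.foldl_append, List.foldl_map]
  split <;> simp

-- fusing a loop whose body is itself a fold into one fold over the flatMap
theorem foldl_flatMap_fuse {α : Type} (f : α → List String) :
    ∀ (xs : List α) (st : List String × PySem.Set String),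
      xs.foldl (fun st x => (f x).foldl pyAddLine st) st = (xs.flatMap f).foldl pyAddLine st := by
  intro xs
  induction xs with
  | nil => intro st; rfl
  | cons x xs ih => intro st; simp [List.foldl_append, ih]

-- A's second loop is a fold of add_line over the filtered types block
theorem typesFuse (child_to_parent : List (String × List String)) :
    ∀ (l : List String) (st : List String × PySem.Set String),
      l.foldl (fun st ont_type =>
          let parents := (PySem.Dict.mk child_to_parent).getD ont_type []
          if parents ≠ [] then pyAddLine st (lineTypeParents ont_type parents) else st) st
      = (l.filterMap (fun ont_type =>
          let parents := (PySem.Dict.mk child_to_parent).getD ont_type []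
          if parents ≠ [] then some (lineTypeParents ont_type parents) else none)).foldl
          pyAddLine st := by
  intro l
  induction l with
  | nil => intro st; rfl
  | cons x xs ih =>
    intro st
    simp only [List.foldl_cons, List.filterMap_cons]
    split <;> simp_all

-- folding add_line from a state whose two components are the same set-list keeps them
-- equal and is exactly folding PySem.Set.add on that list
theorem foldl_pyAddLine_pair :
    ∀ (cs : List String) (l : List String),
      cs.foldl pyAddLine (l, l) = (cs.foldl PySem.Set.add l, cs.foldl PySem.Set.add l) := by
  intro cs
  induction cs with
  | nil => intro l; rfl
  | cons c cs ih =>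
    intro l
    have h : pyAddLine (l, l) c = (PySem.Set.add l c, PySem.Set.add l c) := by
      simp only [pyAddLine, PySem.Set.add]
      split <;> simp_all [PySem.Set.contains]
    simp only [List.foldl_cons, h, ih, PySem.Set.add]

-- filtering out an element already in the accumulator does not change the fold of Set.add
theorem foldl_add_filter_mem (h : String) :
    ∀ (t acc : List String), h ∈ acc →
      t.foldl PySem.Set.add acc = (t.filter (fun x => x != h)).foldl PySem.Set.add acc := by
  intro t
  induction t with
  | nil => intro acc _; rfl
  | cons c cs ih =>
    intro acc hm
    by_cases hc : c = h
    · subst hc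
      have : PySem.Set.add acc c = acc := by
        simp [PySem.Set.add, PySem.Set.contains, hm]
      simp [this, ih acc hm]
    · have hmem : h ∈ PySem.Set.add acc c := by
        simp [PySem.Set.add]; split <;> simp [hm]
      simp [hc, ih _ hmem]

-- if no element of s equals h, the leading h passes straight through the fold
theorem foldl_add_cons_out (h : String) :
    ∀ (s acc : List String), (∀ x ∈ s, x ≠ h) →
      s.foldl PySem.Set.add (h :: acc) = h :: s.foldl PySem.Set.add acc := by
  intro s
  induction s with
  | nil => intro acc _; rfl
  | cons c cs ih =>
    intro acc hne
    have hc : c ≠ h := hne c (by simp)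
    have : PySem.Set.add (h :: acc) c = h :: PySem.Set.add acc c := by
      simp [PySem.Set.add, PySem.Set.contains, hc]
      split <;> simp_all
    simp only [List.foldl_cons, this]
    exact ih _ (fun x hx => hne x (by simp [hx]))

-- B's dedup loop computes exactly set-of-list in first-occurrence order
theorem dedupFilter_eq_ofList_aux : ∀ (n : Nat) (xs : List String), xs.length ≤ n →
    dedupFilter xs = PySem.Set.ofList xs := by
  intro n
  induction n with
  | zero => intro xs hl; rw [List.length_eq_zero_iff.mp (Nat.le_zero.mp hl), dedupFilter]; rfl
  | succ n ih =>
    intro xs hl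
    match xs with
    | [] => rw [dedupFilter]; rfl
    | h :: t =>
      rw [dedupFilter,
          ih (t.filter (fun x => x != h))
            (le_trans (List.length_filter_le _ _) (Nat.le_of_succ_le_succ hl)),
          PySem.Set.ofList_eq_foldl, PySem.Set.ofList_eq_foldl]
      have h1 : (h :: t).foldl PySem.Set.add [] = t.foldl PySem.Set.add [h] := by
        simp [PySem.Set.add, PySem.Set.contains]
      rw [h1, foldl_add_filter_mem h t [h] (by simp),
          foldl_add_cons_out h _ [] (by intro x hx; simpa using (List.of_mem_filter hx))]

theorem dedupFilter_eq_ofList (xs : List String) : dedupFilter xs = PySem.Set.ofList xs :=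
  dedupFilter_eq_ofList_aux xs.length xs le_rfl

-- ===== VERDICT =====
theorem build_relational_context_py_spec : Claim_equal_build_relational_context_py := by
  unfold Claim_equal_build_relational_context_py
  intro batch_row child_to_parent relation_context _
  unfold Spec_build_relational_context_py build_relational_context_py build_relational_context_py_alt bCandidates
  simp only [stepTerm_eq, foldl_flatMap_fuse, typesFuse, ← List.foldl_append]
  have h0 : (([], PySem.Set.empty) : List String × PySem.Set String) = (([], []) : List String × List String) := rfl
  rw [h0, foldl_pyAddLine_pair, dedupFilter_eq_ofList, PySem.Set.ofList_eq_foldl]
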